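-- pv_equiv track=rewrite | github.com/LagoLunatic/mclib | param_entity.py | split_bit_mask_into_multiple_contiguous_masks
-- ===== SOURCE A (Python) =====
-- def split_bit_mask_into_multiple_contiguous_masks(bit_mask):
--   contiguous_bit_masks = []
--
--   first_bit_index = None
--   num_bits = 0
--   for bit_index in range(32):
--     bit_is_set = (bit_mask & (1 << bit_index) != 0)
--     if bit_is_set:
--       num_bits += 1
--       if first_bit_index is None:
--         first_bit_index = bit_index
--     elif first_bit_index is not None:
--       contiguous_bit_mask = ((1 << num_bits) - 1) << first_bit_index
--       contiguous_bit_masks.append(contiguous_bit_mask)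
--       first_bit_index = None
--       num_bits = 0
--
--   if first_bit_index is not None:
--     contiguous_bit_mask = ((1 << num_bits) - 1) << first_bit_index
--     contiguous_bit_masks.append(contiguous_bit_mask)
--
--   return contiguous_bit_masks
-- ===== SOURCE B (Python) =====
-- def split_bit_mask_into_multiple_contiguous_masks(bit_mask):
--   mask = bit_mask % 0x100000000
--   runs = []
--   base = 1
--   while mask:
--     while mask % 2 == 0:
--       mask //= 2
--       base *= 2
--     run = 0
--     while mask % 2 == 1:
--       run += base
--       mask //= 2
--       base *= 2
--     runs.append(run)
--   return runs
-- ===== Notes on version B (the rewrite author's own statement) =====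
-- stated objective: alternative
-- what changed: Replaces A's fixed 32-iteration bit-position scan with sentinel state (first_bit_index/num_bits) by clamping to 32 bits once and then consuming the mask arithmetically: skip the zero tail, accumulate the lowest contiguous run directly as a value, shift it off, and repeat only while bits remain.
import Mathlib
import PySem

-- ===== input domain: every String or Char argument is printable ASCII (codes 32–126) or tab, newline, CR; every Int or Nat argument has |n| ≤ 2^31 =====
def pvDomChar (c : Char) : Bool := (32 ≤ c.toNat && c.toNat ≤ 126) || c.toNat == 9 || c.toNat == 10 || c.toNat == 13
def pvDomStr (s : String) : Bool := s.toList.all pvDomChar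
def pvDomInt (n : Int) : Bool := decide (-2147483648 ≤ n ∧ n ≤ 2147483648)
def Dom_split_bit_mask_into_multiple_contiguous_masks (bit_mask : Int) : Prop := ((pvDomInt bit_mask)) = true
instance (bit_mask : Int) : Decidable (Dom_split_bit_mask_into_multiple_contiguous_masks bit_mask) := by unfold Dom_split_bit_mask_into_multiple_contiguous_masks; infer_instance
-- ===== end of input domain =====

-- B replaces A's fixed 32-iteration bit-position scan (sentinel first_bit_index/num_bits state) by
-- clamping to 32 bits once and then consuming the mask arithmetically, one contiguous run at a time
-- (objective: alternative algorithm, not measured faster).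

-- ===== PORT A =====
-- 'for bit_index in range(32)' is a foldl over List.range 32 (the indices 0..31 are nonnegative, so
-- Nat is exact); first_bit_index : Option Nat (a bit index, 0..31), num_bits : Nat (a count, never
-- negative in A); 'bit_mask & (1 << bit_index)' is PySem.Int.band (Python-exact on negatives), and
-- Python's '<<' on these nonnegative values is Lean's '<<<'.
def aStep (bit_mask : Int) (st : List Int × Option Nat × Nat) (bit_index : Nat) :
    List Int × Option Nat × Nat :=
  if PySem.Int.band bit_mask ((1 : Int) <<< bit_index) ≠ 0 then
    match st with
    | (acc, none, num_bits) => (acc, some bit_index, num_bits + 1)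
    | (acc, some f, num_bits) => (acc, some f, num_bits + 1)
  else
    match st with
    | (acc, some f, num_bits) => (acc ++ [(((1 : Int) <<< num_bits) - 1) <<< f], none, 0)
    | (acc, none, num_bits) => (acc, none, num_bits)

def split_bit_mask_into_multiple_contiguous_masks (bit_mask : Int) : List Int :=
  match (List.range 32).foldl (aStep bit_mask) ([], none, 0) with
  | (acc, some f, num_bits) => acc ++ [(((1 : Int) <<< num_bits) - 1) <<< f]
  | (acc, none, _) => acc

-- ===== PORT B =====
-- Source B's two inner 'while mask % 2 == …' loops and the outer 'while mask' loop become one recursive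
-- helper each; mask = bit_mask % 0x100000000 is nonnegative so it is held as a Nat (exact: Lean's
-- Int.emod with a positive modulus is Python's %, and Nat's / and % on nonnegative values are
-- Python's // and %).  The 'mask ≠ 0' conjunct in bSkip only makes the recursion total: Source B
-- reaches that loop only with mask ≠ 0.
def bSkip (mask base : Nat) : Nat × Nat :=
  if mask ≠ 0 ∧ mask % 2 = 0 then bSkip (mask / 2) (base * 2) else (mask, base)
  termination_by mask
  decreasing_by omega

def bCollect (mask base run : Nat) : Nat × Nat × Nat :=
  if mask % 2 = 1 then bCollect (mask / 2) (base * 2) (run + base) else (mask, base, run)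
  termination_by mask
  decreasing_by omega

-- termination facts for bLoop (cited by its decreasing_by)
theorem bSkip_fst_le (mask : Nat) : ∀ base, (bSkip mask base).1 ≤ mask := by
  induction mask using Nat.strong_induction_on with
  | _ m ih =>
    intro b
    rw [bSkip]
    split
    · exact le_trans (ih (m / 2) (by omega) (b * 2)) (by omega)
    · exact le_refl m

theorem bSkip_fst_odd (mask : Nat) : ∀ base, mask ≠ 0 → (bSkip mask base).1 % 2 = 1 := by
  induction mask using Nat.strong_induction_on with
  | _ m ih =>
    intro b h0
    rw [bSkip]
    split
    · rename_i h; exact ih (m / 2) (by omega) (b * 2) (by omega)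
    · rename_i h; simp only []; omega

theorem bCollect_fst_le (mask : Nat) : ∀ base run, (bCollect mask base run).1 ≤ mask := by
  induction mask using Nat.strong_induction_on with
  | _ m ih =>
    intro b r
    rw [bCollect]
    split
    · rename_i h; exact le_trans (ih (m / 2) (by omega) (b * 2) (r + b)) (by omega)
    · exact le_refl m

theorem bCollect_fst_lt (mask base run : Nat) (h : mask % 2 = 1) :
    (bCollect mask base run).1 < mask := by
  rw [bCollect, if_pos h]
  have := bCollect_fst_le (mask / 2) (base * 2) (run + base)
  omega

def bLoop (mask base : Nat) : List Int :=
  if mask = 0 then []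
  else
    let s := bSkip mask base
    let c := bCollect s.1 s.2 0
    (c.2.2 : Int) :: bLoop c.1 c.2.1
  termination_by mask
  decreasing_by
    have h1 := bSkip_fst_le mask base
    have h2 := bSkip_fst_odd mask base (by omega)
    have h3 := bCollect_fst_lt (bSkip mask base).1 (bSkip mask base).2 0 h2
    omega

def split_bit_mask_into_multiple_contiguous_masks_alt (bit_mask : Int) : List Int :=
  bLoop (bit_mask % 4294967296).toNat 1

-- ===== PRECONDITION & SPEC =====
def Spec_split_bit_mask_into_multiple_contiguous_masks (bit_mask : Int) (out : List Int) : Prop := out = split_bit_mask_into_multiple_contiguous_masks_alt bit_mask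
instance (bit_mask : Int) (out : List Int) : Decidable (Spec_split_bit_mask_into_multiple_contiguous_masks bit_mask out) := by unfold Spec_split_bit_mask_into_multiple_contiguous_masks; infer_instance

-- ===== CLAIM (what is proved, stated in full; the proofs are below) =====
def Claim_equal_split_bit_mask_into_multiple_contiguous_masks : Prop := ∀ (bit_mask : Int), Dom_split_bit_mask_into_multiple_contiguous_masks bit_mask → Spec_split_bit_mask_into_multiple_contiguous_masks bit_mask (split_bit_mask_into_multiple_contiguous_masks bit_mask)

-- ===== LEMMAS AND PROOFS =====

-- The common reference shape: the low-to-high list of the k lowest bits of m,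
-- and the run-splitting function on such a bit list.
def bitsOf (k m : Nat) : List Bool :=
  match k with
  | 0 => []
  | k + 1 => decide (m % 2 = 1) :: bitsOf k (m / 2)

def runsAux : List Bool → Nat → Nat → List Int
  | [], _, run => if run = 0 then [] else [(run : Int)]
  | b :: bs, base, run =>
    if b then runsAux bs (base * 2) (run + base)
    else if run = 0 then runsAux bs (base * 2) 0
    else (run : Int) :: runsAux bs (base * 2) 0

theorem runsAux_bits_zero (k : Nat) : ∀ base run,
    runsAux (bitsOf k 0) base run = if run = 0 then [] else [(run : Int)] := by
  induction k with
  | zero => intro base run; rfl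
  | succ k ih =>
    intro base run
    show runsAux (decide ((0:Nat) % 2 = 1) :: bitsOf k (0 / 2)) base run = _
    norm_num [runsAux]
    by_cases h : run = 0
    · simp [h, ih]
    · simp [h, ih]

-- ===== B side: bLoop agrees with runsAux on the bit list =====
theorem bLoop_even (m b : Nat) (h0 : m ≠ 0) (h2 : m % 2 = 0) :
    bLoop m b = bLoop (m / 2) (b * 2) := by
  conv_lhs => rw [bLoop]
  conv_rhs => rw [bLoop]
  rw [if_neg h0, if_neg (show ¬ m / 2 = 0 by omega)]
  rw [show bSkip m b = bSkip (m / 2) (b * 2) from by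
    conv_lhs => rw [bSkip]
    rw [if_pos ⟨h0, h2⟩]]

theorem bLoop_eq_runsAux (m : Nat) : ∀ k b, m < 2 ^ k → 1 ≤ b →
    (bLoop m b = runsAux (bitsOf k m) b 0) ∧
    (∀ r, r ≠ 0 → runsAux (bitsOf k m) b r =
      ((bCollect m b r).2.2 : Int) :: bLoop (bCollect m b r).1 (bCollect m b r).2.1) := by
  induction m using Nat.strong_induction_on with
  | _ m ih =>
    intro k b hmk hb
    by_cases h0 : m = 0
    · subst h0
      constructor
      · rw [bLoop]
        rw [if_pos rfl, runsAux_bits_zero]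
        simp
      · intro r hr
        rw [runsAux_bits_zero]
        rw [show bCollect 0 b r = (0, b, r) from by rw [bCollect]; simp]
        rw [show bLoop 0 b = ([] : List Int) from by rw [bLoop]; simp]
        simp [hr]
    · obtain ⟨k', rfl⟩ : ∃ k', k = k' + 1 := by
        cases k with
        | zero => exfalso; norm_num at hmk; omega
        | succ k' => exact ⟨k', rfl⟩
      have hpow : (2:Nat) ^ (k' + 1) = 2 * 2 ^ k' := pow_succ' 2 k'
      have hm2 : m / 2 < 2 ^ k' := by omega
      by_cases h2 : m % 2 = 0
      · have hbits : bitsOf (k' + 1) m = false :: bitsOf k' (m / 2) := by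
          simp [bitsOf, h2]
        have hloopstep := bLoop_even m b h0 h2
        have ihm := ih (m / 2) (by omega) k' (b * 2) hm2 (by omega)
        constructor
        · rw [hloopstep, hbits]
          simp only [runsAux]
          norm_num
          exact ihm.1
        · intro r hr
          rw [hbits]
          rw [show bCollect m b r = (m, b, r) from by rw [bCollect]; simp [h2]]
          simp only [runsAux]
          norm_num [hr]
          rw [← ihm.1, hloopstep]
      · have h2' : m % 2 = 1 := by omega
        have hbits : bitsOf (k' + 1) m = true :: bitsOf k' (m / 2) := by
          simp [bitsOf, h2']
        have ihm := ih (m / 2) (by omega) k' (b * 2) hm2 (by omega)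
        have hcol : ∀ r, bCollect m b r = bCollect (m / 2) (b * 2) (r + b) := by
          intro r
          conv_lhs => rw [bCollect]
          rw [if_pos h2']
        constructor
        · rw [bLoop, if_neg h0]
          rw [show bSkip m b = (m, b) from by
            rw [bSkip]; exact if_neg (by omega)]
          show ((bCollect m b 0).2.2 : Int) :: bLoop (bCollect m b 0).1 (bCollect m b 0).2.1 =
            runsAux (bitsOf (k' + 1) m) b 0
          rw [hbits]
          simp only [runsAux]
          rw [ihm.2 (0 + b) (by omega), hcol 0]
          simp
        · intro r hr
          rw [hbits]
          simp only [runsAux]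
          rw [ihm.2 (r + b) (by omega), hcol r]
          simp

-- ===== A side: the fold agrees with runsAux on the bit list =====

-- the Int value A appends, as a Nat
def runVal : Option Nat → Nat → Nat
  | none, _ => 0
  | some f, num => (2 ^ num - 1) * 2 ^ f

def finishA : List Int × Option Nat × Nat → List Int
  | (acc, some f, num_bits) => acc ++ [(((1 : Int) <<< num_bits) - 1) <<< f]
  | (acc, none, _) => acc

theorem shiftVal (num fv : Nat) :
    (((1:Int) <<< num) - 1) <<< fv = (((2 ^ num - 1) * 2 ^ fv : Nat) : Int) := by
  rw [Int.shiftLeft_eq, Int.shiftLeft_eq]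
  push_cast [Nat.one_le_two_pow]
  ring

theorem runVal_succ (num fv : Nat) :
    (2 ^ (num + 1) - 1) * 2 ^ fv = (2 ^ num - 1) * 2 ^ fv + 2 ^ (fv + num) := by
  have h1 : 1 ≤ (2:Nat) ^ num := Nat.one_le_two_pow
  have h2 : (2:Nat) ^ (num + 1) = 2 * 2 ^ num := pow_succ' 2 num
  have h3 : (2:Nat) ^ (fv + num) = 2 ^ fv * 2 ^ num := pow_add 2 fv num
  have h4 : (2:Nat) ^ fv ≤ 2 ^ num * 2 ^ fv := Nat.le_mul_of_pos_left _ (by positivity)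
  rw [h2, h3, Nat.sub_mul, Nat.sub_mul]
  ring_nf
  omega

-- bit i of a nonnegative two's-complement word, flipped, in div/mod form
theorem bit_flip : ∀ (i w n : Nat), i < w → n < 2 ^ w →
    (2 ^ w - 1 - n) / 2 ^ i % 2 = 1 - n / 2 ^ i % 2 := by
  intro i
  induction i with
  | zero =>
    intro w n hi hn
    have h2 : (2:Nat) ^ w = 2 * 2 ^ (w - 1) := by
      have h := pow_succ' 2 (w - 1)
      rwa [show w - 1 + 1 = w by omega] at h
    simp only [pow_zero, Nat.div_one]
    omega
  | succ i ihi =>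
    intro w n hi hn
    have h2 : (2:Nat) ^ w = 2 * 2 ^ (w - 1) := by
      have h := pow_succ' 2 (w - 1)
      rwa [show w - 1 + 1 = w by omega] at h
    have hq : n / 2 < 2 ^ (w - 1) := by omega
    have hstep : (2 ^ w - 1 - n) / 2 = 2 ^ (w - 1) - 1 - n / 2 := by omega
    have hsplit : ∀ m : Nat, m / 2 ^ (i + 1) = m / 2 / 2 ^ i := by
      intro m
      rw [pow_succ' 2 i, ← Nat.div_div_eq_div_mul]
    rw [hsplit, hsplit, hstep]
    exact ihi (w - 1) (n / 2) (by omega) hq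

-- the Python bit test against the clamped mask's bits
theorem bit_test (bit_mask : Int) (hlo : -2147483648 ≤ bit_mask) (hhi : bit_mask ≤ 2147483648)
    (i : Nat) (hi : i < 32) :
    (PySem.Int.band bit_mask ((1 : Int) <<< i) ≠ 0) ↔
      ((bit_mask % 4294967296).toNat / 2 ^ i % 2 = 1) := by
  have hsh : (1:Int) <<< i = (((2:Nat) ^ i : Nat) : Int) := by
    rw [Int.shiftLeft_eq]; push_cast; ring
  have hPpos : (0:Nat) < 2 ^ i := Nat.two_pow_pos i
  by_cases hpos : 0 ≤ bit_mask
  · have hNc : ((bit_mask.toNat : Nat) : Int) = bit_mask := Int.toNat_of_nonneg hpos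
    have hmod : bit_mask % 4294967296 = bit_mask := Int.emod_eq_of_lt hpos (by omega)
    rw [hmod, hsh, ← hNc, PySem.Int.band_natCast]
    rw [Nat.and_two_pow, Nat.toNat_testBit, Int.toNat_natCast]
    rcases (by omega : bit_mask.toNat / 2 ^ i % 2 = 0 ∨ bit_mask.toNat / 2 ^ i % 2 = 1) with h | h
    · rw [h]; simp
    · rw [h]; simp
  · have hneg : bit_mask < 0 := by omega
    have hnc : (((-bit_mask - 1).toNat : Nat) : Int) = -bit_mask - 1 :=
      Int.toNat_of_nonneg (by omega)
    have hnlt : (-bit_mask - 1).toNat < 2 ^ 32 := by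
      have h32 : ((2:Nat) ^ 32 : Nat) = 4294967296 := by norm_num
      omega
    have hmod : bit_mask % 4294967296 = bit_mask + 4294967296 := by omega
    have hm : (bit_mask % 4294967296).toNat = 2 ^ 32 - 1 - (-bit_mask - 1).toNat := by
      have h32 : ((2:Nat) ^ 32 : Nat) = 4294967296 := by norm_num
      rw [hmod]
      omega
    have hband : PySem.Int.band bit_mask (((2:Nat) ^ i : Nat) : Int) =
        (((2:Nat) ^ i - (2 ^ i &&& (-bit_mask - 1).toNat) : Nat) : Int) := by
      simp only [PySem.Int.band]
      rw [if_neg (by omega), if_pos (by positivity), Int.toNat_natCast]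
    rw [hsh, hband, hm, Nat.two_pow_and, Nat.toNat_testBit]
    rw [bit_flip i 32 (-bit_mask - 1).toNat hi hnlt]
    rcases (by omega : (-bit_mask - 1).toNat / 2 ^ i % 2 = 0 ∨
        (-bit_mask - 1).toNat / 2 ^ i % 2 = 1) with h | h
    · rw [h]; simp
    · rw [h]; simp

theorem aFold_eq_runsAux (bit_mask : Int) (hlo : -2147483648 ≤ bit_mask)
    (hhi : bit_mask ≤ 2147483648) :
    ∀ (k i : Nat) (acc : List Int) (f : Option Nat) (num : Nat), i + k = 32 →
    (match f with | none => num = 0 | some fv => fv + num = i ∧ 1 ≤ num) →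
    finishA (List.foldl (aStep bit_mask) (acc, f, num) (List.range' i k)) =
      acc ++ runsAux (bitsOf k ((bit_mask % 4294967296).toNat / 2 ^ i)) (2 ^ i)
        (runVal f num) := by
  intro k
  induction k with
  | zero =>
    intro i acc f num hik hinv
    simp only [List.range'_zero, List.foldl_nil]
    cases f with
    | none =>
      simp only [bitsOf, runsAux, runVal, finishA]
      simp
    | some fv =>
      obtain ⟨hfv, hnum⟩ := hinv
      have hrv : (2:Nat) ^ num - 1 ≠ 0 := by
        have : 2 ≤ (2:Nat) ^ num := by
          calc (2:Nat) ≤ 2 ^ 1 := by norm_num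
            _ ≤ 2 ^ num := Nat.pow_le_pow_right (by norm_num) hnum
        omega
      simp only [bitsOf, runsAux, runVal, finishA]
      rw [if_neg (Nat.mul_ne_zero hrv (by positivity)), shiftVal]
  | succ k ihk =>
    intro i acc f num hik hinv
    have hi32 : i < 32 := by omega
    rw [List.range'_succ, List.foldl_cons]
    have hsucc : (bit_mask % 4294967296).toNat / 2 ^ i / 2 =
        (bit_mask % 4294967296).toNat / 2 ^ (i + 1) := by
      rw [Nat.div_div_eq_div_mul, ← pow_succ]
    have hbits : bitsOf (k + 1) ((bit_mask % 4294967296).toNat / 2 ^ i) =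
        decide ((bit_mask % 4294967296).toNat / 2 ^ i % 2 = 1) ::
          bitsOf k ((bit_mask % 4294967296).toNat / 2 ^ (i + 1)) := by
      simp only [bitsOf]
      rw [hsucc]
    have hbase : (2:Nat) ^ (i + 1) = 2 ^ i * 2 := pow_succ 2 i
    by_cases hbit : PySem.Int.band bit_mask ((1:Int) <<< i) ≠ 0
    · have hb1 : (bit_mask % 4294967296).toNat / 2 ^ i % 2 = 1 :=
        (bit_test bit_mask hlo hhi i hi32).mp hbit
      rw [hbits, hb1]
      cases f with
      | none =>
        subst hinv
        rw [show aStep bit_mask (acc, none, 0) i = (acc, some i, 0 + 1) from by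
          simp [aStep, hbit]]
        rw [ihk (i + 1) acc (some i) 1 (by omega) ⟨by omega, le_refl 1⟩]
        simp only [runsAux, decide_eq_true_eq, runVal]
        rw [hbase]
        norm_num
      | some fv =>
        obtain ⟨hfv, hnum⟩ := hinv
        rw [show aStep bit_mask (acc, some fv, num) i = (acc, some fv, num + 1) from by
          simp [aStep, hbit]]
        rw [ihk (i + 1) acc (some fv) (num + 1) (by omega) ⟨by omega, by omega⟩]
        simp only [runsAux, decide_eq_true_eq, runVal]
        rw [hbase]
        congr 2
        rw [runVal_succ, hfv]
    · simp only [ne_eq, not_not] at hbit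
      have hb0 : (bit_mask % 4294967296).toNat / 2 ^ i % 2 = 0 := by
        have h := (bit_test bit_mask hlo hhi i hi32).mpr
        by_contra hcon
        have : (bit_mask % 4294967296).toNat / 2 ^ i % 2 = 1 := by omega
        exact absurd hbit (by simpa using (h this))
      rw [hbits, hb0]
      cases f with
      | none =>
        subst hinv
        rw [show aStep bit_mask (acc, none, 0) i = (acc, none, 0) from by
          simp [aStep, hbit]]
        rw [ihk (i + 1) acc none 0 (by omega) rfl]
        simp only [runsAux, runVal, decide_eq_true_eq]
        rw [hbase]
        norm_num
      | some fv =>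
        obtain ⟨hfv, hnum⟩ := hinv
        have hrv : ((2:Nat) ^ num - 1) * 2 ^ fv ≠ 0 := by
          have : 2 ≤ (2:Nat) ^ num := by
            calc (2:Nat) ≤ 2 ^ 1 := by norm_num
              _ ≤ 2 ^ num := Nat.pow_le_pow_right (by norm_num) hnum
          exact Nat.mul_ne_zero (by omega) (by positivity)
        rw [show aStep bit_mask (acc, some fv, num) i =
            (acc ++ [(((1:Int) <<< num) - 1) <<< fv], none, 0) from by
          simp [aStep, hbit]]
        rw [ihk (i + 1) (acc ++ [(((1:Int) <<< num) - 1) <<< fv]) none 0 (by omega) rfl]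
        simp only [runsAux, runVal, decide_eq_true_eq]
        rw [hbase, shiftVal]
        simp [hrv]

-- ===== VERDICT (by name: the statement is the Claim_ definition above) =====
theorem split_bit_mask_into_multiple_contiguous_masks_spec : Claim_equal_split_bit_mask_into_multiple_contiguous_masks := by
  intro bit_mask hdom
  have hdom' : -2147483648 ≤ bit_mask ∧ bit_mask ≤ 2147483648 := by
    simpa [Dom_split_bit_mask_into_multiple_contiguous_masks, pvDomInt] using hdom
  obtain ⟨hlo, hhi⟩ := hdom'
  unfold Spec_split_bit_mask_into_multiple_contiguous_masks
  have hA : split_bit_mask_into_multiple_contiguous_masks bit_mask =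
      finishA ((List.range 32).foldl (aStep bit_mask) ([], none, 0)) := by
    unfold split_bit_mask_into_multiple_contiguous_masks
    obtain ⟨acc, f, num⟩ := (List.range 32).foldl (aStep bit_mask) ([], none, 0)
    cases f <;> rfl
  have hfold := aFold_eq_runsAux bit_mask hlo hhi 32 0 [] none 0 (by omega) rfl
  simp only [pow_zero, Nat.div_one, runVal] at hfold
  have hmlt : (bit_mask % 4294967296).toNat < 2 ^ 32 := by
    have h32 : ((2:Nat) ^ 32 : Nat) = 4294967296 := by norm_num
    omega
  have hB := (bLoop_eq_runsAux ((bit_mask % 4294967296).toNat) 32 1 hmlt (le_refl 1)).1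
  rw [hA, List.range_eq_range', hfold]
  unfold split_bit_mask_into_multiple_contiguous_masks_alt
  rw [hB]
  simp
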